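-- pv_equiv track=rewrite | github.com/yinghemedical/U-VLM | uvlm/inference/inference_utils.py | get_case_id_for_filtering
-- ===== SOURCE A (Python) =====
-- from typing import List, Optional, Dict, Tuple
--
-- def get_case_id_for_filtering(identifier: str, val_case_ids: List[str]) -> str:
--     """Extract case ID by progressively stripping trailing numeric parts until a match is found.
--
--     This handles cases like:
--     - train_2_a_1_40 -> train_2_a (matches val_case_id train_2_a)
--
--     Args:
--         identifier: The full identifier
--         val_case_ids: List of validation case IDs to match against
--
--     Returns:
--         The matched case ID, or the original identifier if no match found
--     """
--     parts = identifier.split('_')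
--     val_set = set(val_case_ids)
--
--     for i in range(len(parts), 0, -1):
--         candidate = '_'.join(parts[:i])
--         if candidate in val_set:
--             return candidate
--
--     return identifier
-- ===== SOURCE B (Python) =====
-- from typing import List
--
--
-- def get_case_id_for_filtering(identifier: str, val_case_ids: List[str]) -> str:
--     """Single forward pass: grow the prefix part by part, remembering the last
--     (hence longest) prefix found in the validation set."""
--     vals = set(val_case_ids)
--     parts = identifier.split('_')
--     acc = parts[0]
--     best = acc if acc in vals else None
--     for part in parts[1:]:
--         acc = acc + '_' + part
--         if acc in vals:
--             best = acc
--     return best if best is not None else identifier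
-- ===== Notes on version B (the rewrite author's own statement) =====
-- stated objective: alternative
-- what changed: Replaces A's longest-first descending scan (rebuilding each candidate prefix with join and early-returning on the first hit) with a single forward pass that grows the prefix incrementally by string concatenation and keeps the last matching prefix in a best-so-far accumulator.
import Mathlib
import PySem

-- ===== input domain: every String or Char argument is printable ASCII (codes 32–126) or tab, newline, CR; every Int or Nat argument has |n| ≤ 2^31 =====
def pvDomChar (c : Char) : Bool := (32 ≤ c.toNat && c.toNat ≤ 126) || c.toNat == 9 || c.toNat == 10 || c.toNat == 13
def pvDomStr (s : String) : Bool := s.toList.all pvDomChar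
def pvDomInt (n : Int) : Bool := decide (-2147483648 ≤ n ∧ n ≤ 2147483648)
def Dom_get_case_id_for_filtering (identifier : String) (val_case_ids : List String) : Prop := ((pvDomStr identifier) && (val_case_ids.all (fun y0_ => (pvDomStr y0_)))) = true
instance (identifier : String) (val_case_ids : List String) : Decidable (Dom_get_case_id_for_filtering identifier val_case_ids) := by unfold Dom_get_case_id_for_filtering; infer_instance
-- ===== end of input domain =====

-- B replaces A's longest-first descending candidate scan with one forward pass keeping the last matching prefix (alternative decomposition, same result).


-- ===== PORT A =====
-- identifier.split('_'): the separator "_" is nonempty, so Str.split? is always `some`; the .getD default is never used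
def pvPartsOf (identifier : String) : List String := (PySem.Str.split? identifier "_").getD []

-- the for-loop over range(len(parts), 0, -1) with its early return
def pvLoopA (parts : List String) (val_set : PySem.Set String) (identifier : String) : List Int → String
  | [] => identifier
  | i :: rest =>
    let candidate := PySem.Str.join "_" (PySem.List.slice parts none (some i))
    if PySem.Set.contains val_set candidate then candidate
    else pvLoopA parts val_set identifier rest

def get_case_id_for_filtering (identifier : String) (val_case_ids : List String) : String :=
  let parts := pvPartsOf identifier
  let val_set := PySem.Set.ofList val_case_ids
  pvLoopA parts val_set identifier (PySem.List.pyRange (parts.length : Int) 0 (-1))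

-- ===== PORT B =====
-- loop body of B: extend the accumulated prefix and update best-so-far
def pvStepB (vals : PySem.Set String) (st : String × Option String) (part : String) : String × Option String :=
  let acc := st.1 ++ "_" ++ part
  (acc, if PySem.Set.contains vals acc then some acc else st.2)

def get_case_id_for_filtering_alt (identifier : String) (val_case_ids : List String) : String :=
  let vals := PySem.Set.ofList val_case_ids
  let parts := pvPartsOf identifier
  let acc0 := parts.headD ""   -- parts[0]; split always yields at least one piece
  let best0 : Option String := if PySem.Set.contains vals acc0 then some acc0 else none
  let st := parts.tail.foldl (pvStepB vals) (acc0, best0)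
  match st.2 with
  | some b => b
  | none => identifier

-- ===== PRECONDITION & SPEC =====
def Spec_get_case_id_for_filtering (identifier : String) (val_case_ids : List String) (out : String) : Prop := out = get_case_id_for_filtering_alt identifier val_case_ids
instance (identifier : String) (val_case_ids : List String) (out : String) : Decidable (Spec_get_case_id_for_filtering identifier val_case_ids out) := by unfold Spec_get_case_id_for_filtering; infer_instance

-- ===== CLAIM (what is proved, stated in full; the proofs are below) =====
def Claim_equal_get_case_id_for_filtering : Prop := ∀ (identifier : String) (val_case_ids : List String), Dom_get_case_id_for_filtering identifier val_case_ids → Spec_get_case_id_for_filtering identifier val_case_ids (get_case_id_for_filtering identifier val_case_ids)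

-- ===== LEMMAS AND PROOFS =====

-- the common "best matching prefix among the first i joined parts" (as an Option)
def pvSpec (vals : PySem.Set String) (p : List String) : Nat → Option String
  | 0 => none
  | i + 1 =>
    let c := PySem.Str.join "_" (p.take (i + 1))
    if PySem.Set.contains vals c then some c else pvSpec vals p i

lemma pv_go_ne_nil (sep : List Char) (fuel : Nat) (l cur : List Char) (acc : List (List Char)) :
    PySem.Chars.splitOn.go sep fuel l cur acc ≠ [] := by
  induction fuel generalizing l cur acc with
  | zero => simp [PySem.Chars.splitOn.go]
  | succ n ih =>
    cases l with
    | nil => simp [PySem.Chars.splitOn.go]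
    | cons c rest =>
      rw [PySem.Chars.splitOn.go]
      split
      · exact ih _ _ _
      · exact ih _ _ _

lemma pv_parts_ne_nil (identifier : String) : pvPartsOf identifier ≠ [] := by
  unfold pvPartsOf
  simp [PySem.Str.split?, PySem.Chars.split?, PySem.Chars.splitOn]
  intro h
  exact pv_go_ne_nil _ _ _ _ _ h

lemma pv_chars_join_append_singleton (sep : List Char) (ps : List (List Char)) (q : List Char) (h : ps ≠ []) :
    PySem.Chars.join sep (ps ++ [q]) = PySem.Chars.join sep ps ++ sep ++ q := by
  cases ps with
  | nil => exact absurd rfl h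
  | cons a ps' =>
    induction ps' generalizing a with
    | nil => rw [List.cons_append, List.nil_append, PySem.Chars.join_cons_cons, PySem.Chars.join_singleton, PySem.Chars.join_singleton]
    | cons b ps'' ih =>
      simp only [List.cons_append]
      rw [PySem.Chars.join_cons_cons, ← List.cons_append, ih b (by simp), PySem.Chars.join_cons_cons]
      simp [List.append_assoc]

lemma pv_join_append_singleton (pre : List String) (x : String) (hpre : pre ≠ []) :
    PySem.Str.join "_" (pre ++ [x]) = PySem.Str.join "_" pre ++ "_" ++ x := by
  apply String.toList_injective
  simp only [PySem.Str.toList_join, String.toList_append, List.map_append, List.map_cons, List.map_nil]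
  rw [pv_chars_join_append_singleton _ _ _ (by simpa using hpre)]

lemma pv_loopA_eq (vals : PySem.Set String) (p : List String) (id : String) (i : Nat) :
    pvLoopA p vals id (PySem.List.pyRange (i : Int) 0 (-1)) = (pvSpec vals p i).getD id := by
  induction i with
  | zero =>
    rw [show ((0 : Nat) : Int) = 0 from rfl, PySem.List.pyRange_neg_one_eq_nil le_rfl]
    rfl
  | succ i ih =>
    rw [PySem.List.pyRange_neg_one_cons (by exact_mod_cast Nat.succ_pos i)]
    have hcast : ((i + 1 : Nat) : Int) - 1 = ((i : Nat) : Int) := by push_cast; ring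
    simp only [pvLoopA, hcast, PySem.List.slice_to_natCast]
    rw [show pvSpec vals p (i + 1)
        = (if PySem.Set.contains vals (PySem.Str.join "_" (p.take (i + 1)))
            then some (PySem.Str.join "_" (p.take (i + 1)))
            else pvSpec vals p i) from rfl]
    by_cases hm : PySem.Str.join "_" (p.take (i + 1)) ∈ vals
    · simp [hm]
    · simp [hm, ih]

lemma pv_foldB_eq (vals : PySem.Set String) (t : List String) :
    ∀ (pre : List String), pre ≠ [] →
    List.foldl (pvStepB vals) (PySem.Str.join "_" pre, pvSpec vals (pre ++ t) pre.length) t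
      = (PySem.Str.join "_" (pre ++ t), pvSpec vals (pre ++ t) (pre ++ t).length) := by
  induction t with
  | nil => intro pre hpre; simp
  | cons x t' ih =>
    intro pre hpre
    have hjoin := pv_join_append_singleton pre x hpre
    have htake : ((pre ++ [x]) ++ t').take (pre.length + 1) = pre ++ [x] := by
      have : (pre ++ [x]).length = pre.length + 1 := by simp
      rw [← this, List.take_left]
    have hassoc : pre ++ x :: t' = (pre ++ [x]) ++ t' := by simp
    have hspec : pvSpec vals (pre ++ x :: t') (pre.length + 1)
        = (if PySem.Set.contains vals (PySem.Str.join "_" (pre ++ [x]))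
            then some (PySem.Str.join "_" (pre ++ [x]))
            else pvSpec vals (pre ++ x :: t') pre.length) := by
      conv_lhs => rw [pvSpec]
      rw [hassoc, htake]
    have hstep : pvStepB vals (PySem.Str.join "_" pre, pvSpec vals (pre ++ x :: t') pre.length) x
        = (PySem.Str.join "_" (pre ++ [x]), pvSpec vals (pre ++ x :: t') (pre.length + 1)) := by
      unfold pvStepB
      rw [hspec, ← hjoin]
    rw [List.foldl_cons, hstep]
    have := ih (pre ++ [x]) (by simp)
    rw [hassoc]
    simpa using this

-- ===== VERDICT (by name: the statement is the Claim_ definition above) =====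
lemma pv_join_singleton (x : String) : PySem.Str.join "_" [x] = x := by
  apply String.toList_injective
  simp [PySem.Str.toList_join, PySem.Chars.join_singleton]

theorem get_case_id_for_filtering_spec : Claim_equal_get_case_id_for_filtering := by
  intro identifier val_case_ids _hdom
  unfold Spec_get_case_id_for_filtering
  unfold get_case_id_for_filtering get_case_id_for_filtering_alt
  obtain ⟨hd, t, hpt⟩ := List.exists_cons_of_ne_nil (pv_parts_ne_nil identifier)
  simp only [hpt, List.headD_cons, List.tail_cons, List.length_cons]
  -- A side
  rw [pv_loopA_eq (PySem.Set.ofList val_case_ids) (hd :: t) identifier (t.length + 1)]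
  -- B side: the initial best is pvSpec … 1
  have h1 : (if PySem.Set.contains (PySem.Set.ofList val_case_ids) hd then some hd else none)
      = pvSpec (PySem.Set.ofList val_case_ids) (hd :: t) 1 := by
    rw [show pvSpec (PySem.Set.ofList val_case_ids) (hd :: t) 1
        = (if PySem.Set.contains (PySem.Set.ofList val_case_ids) (PySem.Str.join "_" ((hd :: t).take 1))
            then some (PySem.Str.join "_" ((hd :: t).take 1))
            else pvSpec (PySem.Set.ofList val_case_ids) (hd :: t) 0) from rfl]
    simp [pv_join_singleton, pvSpec]
  have hfold := pv_foldB_eq (PySem.Set.ofList val_case_ids) t [hd] (by simp)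
  simp only [List.singleton_append, List.length_cons, List.length_nil, Nat.zero_add] at hfold
  rw [pv_join_singleton hd, ← h1] at hfold
  rw [hfold]
  cases pvSpec (PySem.Set.ofList val_case_ids) (hd :: t) (t.length + 1) <;> rfl
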